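-- pv_equiv track=rewrite | github.com/jawang35/advent-of-code | 2018/day6.py | area_safe_region
-- ===== SOURCE A (Python) =====
-- def define_contained_area(coordinates):
--     xs = [x for (x, _) in coordinates]
--     ys = [y for (_, y) in coordinates]
--     bottom_right = (max(xs), max(ys))
--     contained_area = [None] * (bottom_right[0] + 1)
--     for x, _ in enumerate(contained_area):
--         contained_area[x] = [None] * (bottom_right[1] + 1)
--     return contained_area
--
-- def taxicab_distance(coord1, coord2):
--     x1, y1 = coord1
--     x2, y2 = coord2
--     return abs(y1 - y2) + abs(x1 - x2)
--
-- def area_safe_region(coordinates):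
--     contained_area = define_contained_area(coordinates)
--
--     area = 0
--     for x, column in enumerate(contained_area):
--         for y, _ in enumerate(column):
--             taxicab_distances = [taxicab_distance(c, (x, y))
--                                  for c in coordinates]
--             if sum(taxicab_distances) < 10000:
--                 area += 1
--
--     return area
-- ===== SOURCE B (Python) =====
-- def area_safe_region(coordinates):
--     xs = [x for (x, _) in coordinates]
--     ys = [y for (_, y) in coordinates]
--     width = max(xs) + 1
--     if width <= 0:
--         return 0
--     height = max(ys) + 1
--     sx = [sum(abs(x - xi) for xi in xs) for x in range(width)]
--     sy = [sum(abs(y - yi) for yi in ys) for y in range(height)]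
--     return sum(sum(1 for dy in sy if dx + dy < 10000) for dx in sx)
-- ===== Notes on version B (the rewrite author's own statement) =====
-- stated objective: faster
-- what changed: Exploits separability of taxicab distance: precomputes per-column x-distance sums and per-row y-distance sums once, so the per-cell scan over all coordinates disappears.
-- outside the precondition, e.g. on area_safe_region([]): A raises ValueError, B raises ValueError
import Mathlib
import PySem

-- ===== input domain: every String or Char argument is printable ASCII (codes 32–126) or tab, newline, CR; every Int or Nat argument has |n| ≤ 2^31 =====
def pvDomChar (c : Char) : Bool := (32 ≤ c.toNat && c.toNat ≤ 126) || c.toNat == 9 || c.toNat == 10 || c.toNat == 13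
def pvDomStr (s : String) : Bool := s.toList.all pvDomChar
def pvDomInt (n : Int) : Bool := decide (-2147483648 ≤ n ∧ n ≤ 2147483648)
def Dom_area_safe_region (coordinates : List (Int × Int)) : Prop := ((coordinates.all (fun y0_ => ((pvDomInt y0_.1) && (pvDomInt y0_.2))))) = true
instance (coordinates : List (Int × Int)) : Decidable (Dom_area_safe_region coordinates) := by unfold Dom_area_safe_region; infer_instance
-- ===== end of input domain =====

-- ===== PORT A =====
-- B changes: separable per-axis distance sums precomputed once instead of a per-cell scan over all coordinates (objective: faster).
-- helper: Python's built-in max(xs); the .getD 0 branch is only reached for [], excluded by Pre_.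
def pyMaxInt (xs : List Int) : Int := (PySem.List.max? xs (fun v => v)).getD 0

def taxicabDistance (coord1 coord2 : Int × Int) : Int :=
  |coord1.2 - coord2.2| + |coord1.1 - coord2.1|

def defineContainedArea (coordinates : List (Int × Int)) : List (List (Option Unit)) :=
  let xs := coordinates.map Prod.fst
  let ys := coordinates.map Prod.snd
  let bottomRight : Int × Int := (pyMaxInt xs, pyMaxInt ys)
  -- [None] * (bottom_right[0] + 1), then each slot replaced by [None] * (bottom_right[1] + 1)
  let outer := List.replicate (bottomRight.1 + 1).toNat (none : Option Unit)
  outer.map (fun _ => List.replicate (bottomRight.2 + 1).toNat (none : Option Unit))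

def area_safe_region (coordinates : List (Int × Int)) : Int :=
  let containedArea := defineContainedArea coordinates
  (PySem.List.enumerate containedArea).foldl (fun area p =>
    (PySem.List.enumerate p.2).foldl (fun area q =>
      let taxicabDistances := coordinates.map (fun c => taxicabDistance c (p.1, q.1))
      if taxicabDistances.sum < 10000 then area + 1 else area) area) 0

-- ===== PORT B =====
def area_safe_region_alt (coordinates : List (Int × Int)) : Int :=
  let xs := coordinates.map Prod.fst
  let ys := coordinates.map Prod.snd
  let width := pyMaxInt xs + 1
  if width ≤ 0 then 0 else
  let height := pyMaxInt ys + 1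
  let sx := (PySem.List.pyRange 0 width).map (fun x => (xs.map (fun xi => |x - xi|)).sum)
  let sy := (PySem.List.pyRange 0 height).map (fun y => (ys.map (fun yi => |y - yi|)).sum)
  sx.foldl (fun acc dx => acc + (sy.countP (fun dy => decide (dx + dy < 10000)) : Int)) 0

-- ===== PRECONDITION & SPEC =====
-- Pre_ excludes only the empty list, on which Python's max([]) raises ValueError (in both A and B).
def Pre_area_safe_region (coordinates : List (Int × Int)) : Prop := coordinates ≠ []
instance (coordinates : List (Int × Int)) : Decidable (Pre_area_safe_region coordinates) := by unfold Pre_area_safe_region; infer_instance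
def pvWitness_area_safe_region : (List (Int × Int)) := [(1, 2), (3, 0)]
def Spec_area_safe_region (coordinates : List (Int × Int)) (out : Int) : Prop := out = area_safe_region_alt coordinates
instance (coordinates : List (Int × Int)) (out : Int) : Decidable (Spec_area_safe_region coordinates out) := by unfold Spec_area_safe_region; infer_instance

-- ===== CLAIM (what is proved, stated in full; the proofs are below) =====
def Claim_equal_area_safe_region : Prop := ∀ (coordinates : List (Int × Int)), Dom_area_safe_region coordinates → Pre_area_safe_region coordinates → Spec_area_safe_region coordinates (area_safe_region coordinates)

-- ===== LEMMAS AND PROOFS =====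

-- pyRange 0 n is insensitive to clamping n at 0
theorem pyRange_zero_toNat (n : Int) :
    PySem.List.pyRange 0 ((n.toNat : Int)) = PySem.List.pyRange 0 n := by
  by_cases h : n ≤ 0
  · rw [PySem.List.pyRange_one_eq_nil h, PySem.List.pyRange_one_eq_nil (by omega)]
  · rw [Int.toNat_of_nonneg (by omega)]

-- enumerating a replicated list pairs each index with the same element
theorem enumerate_replicate {α : Type} (n : Nat) (a : α) (s : Int) :
    PySem.List.enumerate (List.replicate n a) s
      = (PySem.List.pyRange s (s + n)).map (fun i => (i, a)) := by
  induction n generalizing s with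
  | zero => simp [PySem.List.enumerate_nil, PySem.List.pyRange_one_eq_nil (le_refl s)]
  | succ m ih =>
      rw [List.replicate_succ, PySem.List.enumerate_cons, ih,
        show s + ((m + 1 : Nat) : Int) = s + 1 + (m : Int) by push_cast; ring,
        PySem.List.pyRange_one_cons (a := s) (b := s + 1 + (m : Int)) (by omega)]
      simp

-- a fold over enumerate whose body only uses the index is a fold over the index range
theorem foldl_enumerate_fst {α β : Type} (xs : List α) (f : β → Int → β) (init : β) :
    (PySem.List.enumerate xs).foldl (fun a p => f a p.1) init
      = (PySem.List.pyRange 0 (xs.length : Int)).foldl f init := by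
  have h := PySem.List.map_fst_enumerate xs 0
  rw [zero_add] at h
  rw [← h, List.foldl_map]

-- separability of the summed taxicab distance
theorem sum_taxicab_split (coordinates : List (Int × Int)) (x y : Int) :
    (coordinates.map (fun c => taxicabDistance c (x, y))).sum
      = ((coordinates.map Prod.fst).map (fun xi => |x - xi|)).sum
        + ((coordinates.map Prod.snd).map (fun yi => |y - yi|)).sum := by
  have h : (coordinates.map (fun c => taxicabDistance c (x, y))).sum
      = (coordinates.map (fun c => |x - c.1| + |y - c.2|)).sum := by
    refine congrArg List.sum (List.map_congr_left ?_)
    intro c _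
    simp [taxicabDistance, abs_sub_comm]
    ring
  rw [h, PySem.List.sum_map_add_int, List.map_map, List.map_map]
  rfl

-- ===== VERDICT (by name: the statement is the Claim_ definition above) =====
theorem area_safe_region_spec : Claim_equal_area_safe_region := by
  intro coordinates _ _
  show area_safe_region coordinates = area_safe_region_alt coordinates
  simp only [area_safe_region, area_safe_region_alt, defineContainedArea, List.map_const']
  by_cases hw : pyMaxInt (coordinates.map Prod.fst) + 1 ≤ 0
  · rw [if_pos hw, Int.toNat_eq_zero.mpr hw]
    simp [PySem.List.enumerate_nil]
  rw [if_neg hw]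
  rw [enumerate_replicate, List.foldl_map, List.foldl_map]
  simp only [zero_add, List.length_replicate]
  rw [pyRange_zero_toNat]
  congr 1
  funext area x
  rw [foldl_enumerate_fst (f := fun area y =>
        if (coordinates.map (fun c => taxicabDistance c (x, y))).sum < 10000 then area + 1 else area)]
  simp only [List.length_replicate, pyRange_zero_toNat]
  rw [PySem.List.foldl_ite_add_one
        (p := fun y => (coordinates.map (fun c => taxicabDistance c (x, y))).sum < 10000)]
  rw [List.countP_map]
  refine congrArg (fun n : Nat => area + (n : Int)) (List.countP_congr ?_)
  intro y _
  simp only [Function.comp]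
  rw [sum_taxicab_split]
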